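-- pv_equiv track=rewrite | github.com/anton31kah/AdventOfCode | src/year2022/day08/part1.py | find_from_bottom
-- ===== SOURCE A (Python) =====
-- def find_from_bottom(grid):
--     from_bottom = []
--
--     from_bottom_max = grid[-1][:]
--     for row in reversed(grid):
--         from_bottom_row = []
--         for idx, cell in enumerate(row):
--             from_bottom_max[idx] = max(from_bottom_max[idx], cell)
--             from_bottom_row.append(from_bottom_max[idx])
--         from_bottom.append(from_bottom_row)
--
--     return list(reversed(from_bottom))
-- ===== SOURCE B (Python) =====
-- def find_from_bottom(grid):
--     n = len(grid)
--     cols = []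
--     for j in range(len(grid[-1])):
--         acc = grid[-1][j]
--         col = []
--         for i in range(n - 1, -1, -1):
--             if j < len(grid[i]):
--                 acc = max(acc, grid[i][j])
--             col.append(acc)
--         col.reverse()
--         cols.append(col)
--     return [[cols[j][i] for j in range(len(row))] for i, row in enumerate(grid)]
-- ===== Notes on version B (the rewrite author's own statement) =====
-- stated objective: alternative
-- what changed: B traverses the grid column-by-column (one bottom-up running-max scan per column of the last row, then reassembles rows), instead of A's row-by-row sweep mutating a shared per-column max buffer.
import Mathlib
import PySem

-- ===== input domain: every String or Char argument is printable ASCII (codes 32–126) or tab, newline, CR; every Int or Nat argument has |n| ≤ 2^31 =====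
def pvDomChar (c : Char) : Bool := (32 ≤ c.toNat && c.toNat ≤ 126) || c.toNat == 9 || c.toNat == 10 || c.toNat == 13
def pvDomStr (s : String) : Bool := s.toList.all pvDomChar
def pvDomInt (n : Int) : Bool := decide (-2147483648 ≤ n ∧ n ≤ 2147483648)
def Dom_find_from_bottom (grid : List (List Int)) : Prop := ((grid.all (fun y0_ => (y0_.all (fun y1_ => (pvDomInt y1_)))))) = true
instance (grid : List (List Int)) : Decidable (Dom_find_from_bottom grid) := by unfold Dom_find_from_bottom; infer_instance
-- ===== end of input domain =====

-- B re-implements A column-by-column (one bottom-up running-max scan per column) instead of A's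
-- row-by-row sweep over a mutated per-column max buffer; same cost, different traversal.

-- ===== PORT A =====
-- inner loop: for idx, cell in enumerate(row): fbm[idx] = max(fbm[idx], cell); out.append(fbm[idx])
def aLoopInner : List Int → Nat → List Int → List Int → List Int × List Int
  | fbm, _, acc, [] => (fbm, acc)
  | fbm, idx, acc, cell :: rest =>
    let v := max (fbm.getD idx 0) cell   -- fbm[idx]; Pre_ guarantees idx in range (A raises otherwise)
    aLoopInner (fbm.set idx v) (idx + 1) (acc ++ [v]) rest

-- outer loop: for row in reversed(grid): …; from_bottom.append(from_bottom_row)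
def aLoopOuter : List Int → List (List Int) → List (List Int) → List Int × List (List Int)
  | fbm, acc, [] => (fbm, acc)
  | fbm, acc, row :: rest =>
    let r := aLoopInner fbm 0 [] row
    aLoopOuter r.1 (acc ++ [r.2]) rest

def find_from_bottom (grid : List (List Int)) : List (List Int) :=
  let fbm := (grid.getLast?).getD []    -- grid[-1][:]; Pre_ guarantees grid ≠ [] (A raises otherwise)
  ((aLoopOuter fbm [] grid.reverse).2).reverse

-- ===== PORT B =====
-- per-column loop: for i in range(n-1,-1,-1): if j < len(grid[i]): acc = max(acc, grid[i][j]); col.append(acc)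
def bColLoop : Int → List Int → Nat → List (List Int) → List Int
  | _, col, _, [] => col
  | acc, col, j, row :: rest =>
    let acc' := if j < row.length then max acc (row.getD j 0) else acc
    bColLoop acc' (col ++ [acc']) j rest

def find_from_bottom_alt (grid : List (List Int)) : List (List Int) :=
  let last := (grid.getLast?).getD []   -- grid[-1]; Pre_ guarantees grid ≠ []
  let cols := (List.range last.length).map (fun j =>
    (bColLoop (last.getD j 0) [] j grid.reverse).reverse)
  (PySem.List.enumerate grid 0).map (fun p =>
    (List.range p.2.length).map (fun j => (cols.getD j []).getD p.1.toNat 0))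

-- ===== PRECONDITION & SPEC =====
-- Pre_ excludes exactly the inputs on which A raises IndexError: the empty grid (grid[-1]) and
-- grids containing a row longer than the last row (from_bottom_max[idx] out of range). B raises there too.
def Pre_find_from_bottom (grid : List (List Int)) : Prop :=
  grid ≠ [] ∧ ∀ r ∈ grid, r.length ≤ ((grid.getLast?).getD []).length
instance (grid : List (List Int)) : Decidable (Pre_find_from_bottom grid) := by unfold Pre_find_from_bottom; infer_instance
def pvWitness_find_from_bottom : List (List Int) := [[3, 0, 3], [2, 5], [6, 5, 3]]

def Spec_find_from_bottom (grid : List (List Int)) (out : List (List Int)) : Prop := out = find_from_bottom_alt grid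
instance (grid : List (List Int)) (out : List (List Int)) : Decidable (Spec_find_from_bottom grid out) := by unfold Spec_find_from_bottom; infer_instance

-- ===== CLAIM (what is proved, stated in full; the proofs are below) =====
def Claim_equal_find_from_bottom : Prop := ∀ (grid : List (List Int)), Dom_find_from_bottom grid → Pre_find_from_bottom grid → Spec_find_from_bottom grid (find_from_bottom grid)

-- ===== LEMMAS AND PROOFS =====

-- the per-column step both programs perform at one row
def stepC (j : Nat) (a : Int) (r : List Int) : Int :=
  if j < r.length then max a (r.getD j 0) else a

-- spec-level scan of B's inner loop
def colScan (j : Nat) (a : Int) : List (List Int) → List Int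
  | [] => []
  | r :: rest => stepC j a r :: colScan j (stepC j a r) rest

-- spec-level scan of A's outer loop
def rowScan : List Int → List (List Int) → List (List Int)
  | _, [] => []
  | fbm, r :: rest =>
    (List.range r.length).map (fun j => max (fbm.getD j 0) (r.getD j 0)) ::
      rowScan (aLoopInner fbm 0 [] r).1 rest

theorem aLoopInner_len (row : List Int) : ∀ fbm idx acc, ((aLoopInner fbm idx acc row).1).length = fbm.length := by
  induction row with
  | nil => intro fbm idx acc; simp [aLoopInner]
  | cons c rest ih => intro fbm idx acc; simp [aLoopInner, ih]

theorem aLoopInner_snd (row : List Int) : ∀ fbm idx acc,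
    (aLoopInner fbm idx acc row).2
      = acc ++ (List.range row.length).map (fun t => max (fbm.getD (idx + t) 0) (row.getD t 0)) := by
  induction row with
  | nil => intro fbm idx acc; simp [aLoopInner]
  | cons c rest ih =>
    intro fbm idx acc
    rw [aLoopInner, ih]
    rw [show (c :: rest).length = rest.length + 1 from rfl, List.range_succ_eq_map]
    simp only [List.map_cons, List.map_map, List.append_assoc, List.singleton_append]
    congr 1
    congr 1
    apply List.map_congr_left
    intro t ht
    simp only [Function.comp_apply, Nat.succ_eq_add_one, List.getD,
      List.getElem?_cons_succ]
    rw [List.getElem?_set_ne (by omega : idx ≠ idx + 1 + t),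
        show idx + 1 + t = idx + (t + 1) from by omega]

theorem aLoopInner_fst (row : List Int) : ∀ fbm idx, idx + row.length ≤ fbm.length → ∀ acc k,
    ((aLoopInner fbm idx acc row).1).getD k 0
      = if idx ≤ k ∧ k < idx + row.length then max (fbm.getD k 0) (row.getD (k - idx) 0) else fbm.getD k 0 := by
  induction row with
  | nil =>
    intro fbm idx h acc k
    rw [aLoopInner]
    rw [if_neg (by simp only [List.length_nil]; omega)]
  | cons c rest ih =>
    intro fbm idx h acc k
    rw [aLoopInner]
    have hidx : idx < fbm.length := by simp only [List.length_cons] at h; omega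
    have h2 : idx + 1 + rest.length ≤ (fbm.set idx (max (fbm.getD idx 0) c)).length := by
      simp only [List.length_set, List.length_cons] at h ⊢; omega
    rw [ih _ _ h2]
    have hset : ∀ m, (fbm.set idx (max (fbm.getD idx 0) c)).getD m 0
        = if m = idx then max (fbm.getD m 0) c else fbm.getD m 0 := by
      intro m
      by_cases hm : m = idx
      · subst hm
        simp [List.getD, hidx]
      · simp [List.getD, List.getElem?_set_ne (fun e => hm e.symm), hm]
    by_cases hk1 : k = idx
    · subst hk1
      rw [if_neg (by omega), hset, if_pos rfl,
          if_pos (by simp only [List.length_cons]; omega)]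
      simp [List.getD]
    · by_cases hk2 : idx + 1 ≤ k ∧ k < idx + 1 + rest.length
      · rw [if_pos hk2, if_pos (by simp only [List.length_cons]; omega), hset, if_neg hk1]
        congr 1
        have hki : k - idx = (k - (idx + 1)) + 1 := by omega
        rw [hki]
        simp [List.getD]
      · rw [if_neg hk2, hset, if_neg hk1,
          if_neg (by simp only [List.length_cons]; omega)]

theorem aLoopOuter_snd (rows : List (List Int)) : ∀ fbm acc,
    (aLoopOuter fbm acc rows).2 = acc ++ rowScan fbm rows := by
  induction rows with
  | nil => intro fbm acc; simp [aLoopOuter, rowScan]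
  | cons r rest ih =>
    intro fbm acc
    simp only [aLoopOuter, rowScan, ih, aLoopInner_snd]
    simp

theorem bColLoop_eq (rows : List (List Int)) : ∀ a col j,
    bColLoop a col j rows = col ++ colScan j a rows := by
  induction rows with
  | nil => intro a col j; simp [bColLoop, colScan]
  | cons r rest ih =>
    intro a col j
    simp only [bColLoop, colScan, ih, stepC]
    simp

theorem colScan_len (rows : List (List Int)) : ∀ j a, (colScan j a rows).length = rows.length := by
  induction rows with
  | nil => intro j a; simp [colScan]
  | cons r rest ih => intro j a; simp [colScan, ih]

theorem rowScan_len (rows : List (List Int)) : ∀ fbm, (rowScan fbm rows).length = rows.length := by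
  induction rows with
  | nil => intro fbm; simp [rowScan]
  | cons r rest ih => intro fbm; simp [rowScan, ih]

-- cell formula of rowScan
theorem rowScan_get (rows : List (List Int)) : ∀ fbm, (∀ r ∈ rows, r.length ≤ fbm.length) →
    ∀ i (hi : i < rows.length),
      (rowScan fbm rows).getD i []
        = (List.range (rows[i].length)).map
            (fun j => rows.take (i+1) |>.foldl (fun a r => stepC j a r) (fbm.getD j 0)) := by
  induction rows with
  | nil => intro fbm h i hi; simp at hi
  | cons r rest ih =>
    intro fbm h i hi
    have hr : r.length ≤ fbm.length := h r (List.mem_cons_self ..)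
    have hfst : ∀ k, ((aLoopInner fbm 0 [] r).1).getD k 0 = stepC k (fbm.getD k 0) r := by
      intro k
      rw [aLoopInner_fst r fbm 0 (by omega) [] k]
      simp only [Nat.zero_add, Nat.sub_zero, Nat.zero_le, true_and, stepC]
    cases i with
    | zero =>
      simp only [rowScan, List.getD, List.getElem?_cons_zero, Option.getD_some,
        List.getElem_cons_zero, List.take_succ_cons, List.take_zero, List.foldl_cons,
        List.foldl_nil]
      apply List.map_congr_left
      intro j hj
      simp only [List.mem_range] at hj
      simp [stepC, hj]
    | succ i =>
      have hrest : ∀ r' ∈ rest, r'.length ≤ ((aLoopInner fbm 0 [] r).1).length := by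
        intro r' hr'
        rw [aLoopInner_len]
        exact h r' (List.mem_cons_of_mem _ hr')
      rw [rowScan, show ∀ (x : List Int) (l : List (List Int)),
            (x :: l).getD (i+1) [] = l.getD i [] from fun x l => by simp [List.getD]]
      rw [ih _ hrest i (by simpa using hi)]
      simp only [List.getElem_cons_succ, List.take_succ_cons, List.foldl_cons]
      apply List.map_congr_left
      intro j hj
      congr 1
      exact hfst j

-- element formula of colScan
theorem colScan_get (rows : List (List Int)) : ∀ j a i, i < rows.length →
    (colScan j a rows).getD i 0 = (rows.take (i+1)).foldl (fun x r => stepC j x r) a := by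
  induction rows with
  | nil => intro j a i hi; simp at hi
  | cons r rest ih =>
    intro j a i hi
    cases i with
    | zero => simp [colScan, List.getD]
    | succ i =>
      rw [colScan, show ∀ (x : Int) (l : List Int),
            (x :: l).getD (i+1) 0 = l.getD i 0 from fun x l => by simp [List.getD]]
      rw [ih j _ i (by simpa using hi)]
      simp

-- ===== VERDICT (by name: the statement is the Claim_ definition above) =====
-- getElem/getD bridge for in-range indices
theorem getD_of_lt {α : Type} (l : List α) (d : α) (k : Nat) (h : k < l.length) :
    l.getD k d = l[k] := by
  simp [List.getD, List.getElem?_eq_getElem h]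

theorem find_from_bottom_spec : Claim_equal_find_from_bottom := by
  intro grid _ hpre
  unfold Spec_find_from_bottom
  obtain ⟨hne, hlen⟩ := hpre
  simp only [find_from_bottom, find_from_bottom_alt]
  have hA : (aLoopOuter ((grid.getLast?).getD []) [] grid.reverse).2
      = rowScan ((grid.getLast?).getD []) grid.reverse := by
    rw [aLoopOuter_snd]; simp
  rw [hA]
  set fbm := (grid.getLast?).getD [] with hfbm
  have hlenR : ∀ r ∈ grid.reverse, r.length ≤ fbm.length := by
    intro r hr; exact hlen r (List.mem_reverse.mp hr)
  apply List.ext_getElem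
  · simp [rowScan_len, PySem.List.length_enumerate]
  · intro i h1 h2
    have hi : i < grid.length := by
      rw [List.length_reverse, rowScan_len, List.length_reverse] at h1
      exact h1
    have hnR : grid.reverse.length = grid.length := List.length_reverse
    have hscanlen : (rowScan fbm grid.reverse).length = grid.length := by
      rw [rowScan_len, hnR]
    have hk : grid.length - 1 - i < grid.reverse.length := by rw [hnR]; omega
    -- A side
    rw [List.getElem_reverse]
    rw [← getD_of_lt _ [] _ (by rw [hscanlen]; omega)]
    rw [show (rowScan fbm grid.reverse).length - 1 - i = grid.length - 1 - i from by
      rw [hscanlen]]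
    rw [rowScan_get grid.reverse fbm hlenR (grid.length - 1 - i) hk]
    -- B side
    rw [List.getElem_map, PySem.List.getElem_enumerate]
    have hRi : grid.reverse[grid.length - 1 - i]'hk = grid[i] := by
      rw [List.getElem_reverse]
      congr 1
      omega
    rw [hRi]
    simp only [zero_add, Int.toNat_natCast]
    apply List.map_congr_left
    intro j hj
    simp only [List.mem_range] at hj
    have hji : j < fbm.length := le_trans hj (hlen grid[i] (List.getElem_mem hi))
    -- resolve cols.getD j
    have hcols : (((List.range fbm.length).map (fun j =>
          (bColLoop (fbm.getD j 0) [] j grid.reverse).reverse)).getD j []).getD i 0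
        = ((colScan j (fbm.getD j 0) grid.reverse).reverse).getD i 0 := by
      rw [getD_of_lt _ [] j (by simp [hji])]
      rw [List.getElem_map]
      rw [bColLoop_eq]
      simp
    rw [hcols]
    have hcslen : (colScan j (fbm.getD j 0) grid.reverse).length = grid.length := by
      rw [colScan_len, hnR]
    rw [getD_of_lt _ 0 i (by rw [List.length_reverse, colScan_len, List.length_reverse]; exact hi)]
    rw [List.getElem_reverse]
    rw [← getD_of_lt _ 0 _ (by rw [hcslen]; omega)]
    rw [show (colScan j (fbm.getD j 0) grid.reverse).length - 1 - i
          = grid.length - 1 - i from by rw [hcslen]]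
    rw [colScan_get grid.reverse j (fbm.getD j 0) (grid.length - 1 - i) hk]
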